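-- pv_equiv track=rewrite | github.com/atinmathur/numero-app | main.py | update_vedic_grid
-- ===== SOURCE A (Python) =====
-- VEDIC_MATRIX = [
--     [3, 1, 9],
--     [6, 7, 5],
--     [2, 8, 4]
-- ]
--
-- def update_vedic_grid(base_grid, mahadasha, antardasha):
--     # Create a new updated grid
--     updated_grid = []
--
--     for row_index, row in enumerate(VEDIC_MATRIX):  # Iterate through the original Vedic matrix
--         updated_row = []
--         for col_index, cell in enumerate(row):
--             # Get the current cell value from the base grid
--             current_value = base_grid[row_index][col_index]
--
--             # Append Mahadasha or Antardasha if the position matches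
--             if cell == mahadasha:
--                 current_value += str(mahadasha)
--             if cell == antardasha:
--                 current_value += str(antardasha)
--
--             updated_row.append(current_value)
--         updated_grid.append(updated_row)
--
--     return updated_grid
-- ===== SOURCE B (Python) =====
-- VEDIC_MATRIX = [
--     [3, 1, 9],
--     [6, 7, 5],
--     [2, 8, 4]
-- ]
--
-- # Inverse lookup: digit -> (row, col) in VEDIC_MATRIX, built once.
-- VEDIC_POS = {cell: (r, c)
--              for r, row in enumerate(VEDIC_MATRIX)
--              for c, cell in enumerate(row)}
--
--
-- def update_vedic_grid(base_grid, mahadasha, antardasha):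
--     # Fresh copy of the 3x3 region the original reads.
--     updated_grid = [[base_grid[r][c] for c in range(3)] for r in range(3)]
--     # Jump straight to the matched cell for each value, mahadasha first.
--     for value in (mahadasha, antardasha):
--         pos = VEDIC_POS.get(value)
--         if pos is not None:
--             r, c = pos
--             updated_grid[r][c] += str(value)
--     return updated_grid
-- ===== Notes on version B (the rewrite author's own statement) =====
-- stated objective: alternative
-- what changed: Replaces the 9-cell scan that compares every matrix cell against both values with a precomputed inverse digit->(row,col) lookup: B copies the 3x3 region once and appends directly at the (at most two) matched positions.
import Mathlib
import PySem

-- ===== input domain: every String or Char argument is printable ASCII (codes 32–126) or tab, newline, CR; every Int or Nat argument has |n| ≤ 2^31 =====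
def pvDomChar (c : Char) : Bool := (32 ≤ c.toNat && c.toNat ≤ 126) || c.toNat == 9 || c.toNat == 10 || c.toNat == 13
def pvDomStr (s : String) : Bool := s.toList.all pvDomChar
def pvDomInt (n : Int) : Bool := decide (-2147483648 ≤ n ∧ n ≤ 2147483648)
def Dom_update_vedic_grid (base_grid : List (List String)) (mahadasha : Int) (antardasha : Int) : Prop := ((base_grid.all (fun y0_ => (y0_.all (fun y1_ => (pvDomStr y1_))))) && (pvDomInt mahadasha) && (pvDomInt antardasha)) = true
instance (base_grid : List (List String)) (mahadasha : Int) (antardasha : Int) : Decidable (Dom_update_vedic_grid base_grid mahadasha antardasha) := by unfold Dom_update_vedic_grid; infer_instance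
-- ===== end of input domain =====

-- B builds the 3x3 copy once and jumps straight to the (at most two) matched cells
-- via an inverse digit->position lookup, instead of testing all 9 cells against both values.

-- ===== PORT A =====
def vedicMatrix : List (List Int) := [[3, 1, 9], [6, 7, 5], [2, 8, 4]]

def update_vedic_grid (base_grid : List (List String)) (mahadasha : Int) (antardasha : Int) : List (List String) :=
  (PySem.List.enumerate vedicMatrix).foldl (fun updated_grid (ri, row) =>
    let updated_row := (PySem.List.enumerate row).foldl (fun updated_row (ci, cell) =>
      let current_value := PySem.List.pyGetD (PySem.List.pyGetD base_grid ri []) ci ""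
      let current_value := if cell == mahadasha then current_value ++ PySem.Int.toStr mahadasha else current_value
      let current_value := if cell == antardasha then current_value ++ PySem.Int.toStr antardasha else current_value
      updated_row ++ [current_value]) []
    updated_grid ++ [updated_row]) []

-- ===== PORT B =====
-- VEDIC_POS: digit -> (row, col), built once (Source B's dict comprehension as a literal dict).
def vedicPos : PySem.Dict Int (Nat × Nat) :=
  PySem.Dict.empty.insert 3 (0, 0) |>.insert 1 (0, 1) |>.insert 9 (0, 2)
    |>.insert 6 (1, 0) |>.insert 7 (1, 1) |>.insert 5 (1, 2)
    |>.insert 2 (2, 0) |>.insert 8 (2, 1) |>.insert 4 (2, 2)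

-- one iteration of Source B's 'for value in (mahadasha, antardasha)' loop body
def vedicApply (grid : List (List String)) (value : Int) : List (List String) :=
  match PySem.Dict.get? vedicPos value with
  | none => grid
  | some (r, c) => grid.modify r (fun row => row.modify c (fun s => s ++ PySem.Int.toStr value))

def update_vedic_grid_alt (base_grid : List (List String)) (mahadasha : Int) (antardasha : Int) : List (List String) :=
  let updated_grid := (PySem.List.pyRange 0 3 1).map (fun r =>
    (PySem.List.pyRange 0 3 1).map (fun c => PySem.List.pyGetD (PySem.List.pyGetD base_grid r []) c ""))
  [mahadasha, antardasha].foldl vedicApply updated_grid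

-- ===== PRECONDITION & SPEC =====
-- Pre_ excludes exactly the inputs where base_grid[r][c] raises IndexError in both
-- A and B: fewer than 3 rows, or one of the first 3 rows shorter than 3.
def Pre_update_vedic_grid (base_grid : List (List String)) (mahadasha : Int) (antardasha : Int) : Prop :=
  3 ≤ base_grid.length ∧ ∀ row ∈ base_grid.take 3, 3 ≤ row.length
instance (base_grid : List (List String)) (mahadasha : Int) (antardasha : Int) : Decidable (Pre_update_vedic_grid base_grid mahadasha antardasha) := by unfold Pre_update_vedic_grid; infer_instance

def pvWitness_update_vedic_grid : List (List String) × Int × Int :=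
  ([["a", "b", "c"], ["d", "e", "f"], ["g", "h", "i"]], 7, 1)

def Spec_update_vedic_grid (base_grid : List (List String)) (mahadasha : Int) (antardasha : Int) (out : List (List String)) : Prop := out = update_vedic_grid_alt base_grid mahadasha antardasha
instance (base_grid : List (List String)) (mahadasha : Int) (antardasha : Int) (out : List (List String)) : Decidable (Spec_update_vedic_grid base_grid mahadasha antardasha out) := by unfold Spec_update_vedic_grid; infer_instance

-- ===== CLAIM (what is proved, stated in full; the proofs are below) =====
def Claim_equal_update_vedic_grid : Prop := ∀ (base_grid : List (List String)) (mahadasha : Int) (antardasha : Int), Dom_update_vedic_grid base_grid mahadasha antardasha → Pre_update_vedic_grid base_grid mahadasha antardasha → Spec_update_vedic_grid base_grid mahadasha antardasha (update_vedic_grid base_grid mahadasha antardasha)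

-- ===== LEMMAS AND PROOFS =====

-- any Int is one of the nine vedic digits or none of them
lemma vedic_cases (m : Int) :
    m = 3 ∨ m = 1 ∨ m = 9 ∨ m = 6 ∨ m = 7 ∨ m = 5 ∨ m = 2 ∨ m = 8 ∨ m = 4 ∨
    (m ≠ 3 ∧ m ≠ 1 ∧ m ≠ 9 ∧ m ≠ 6 ∧ m ≠ 7 ∧ m ≠ 5 ∧ m ≠ 2 ∧ m ≠ 8 ∧ m ≠ 4) := by
  omega

-- base_grid[i][j] on a list with three visible heads, for the nine literal index pairs
lemma pyGetD_cons0 {α : Type} (x y z : α) (t : List α) (d : α) :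
    PySem.List.pyGetD (x :: y :: z :: t) 0 d = x := by simp [pysem]
lemma pyGetD_cons1 {α : Type} (x y z : α) (t : List α) (d : α) :
    PySem.List.pyGetD (x :: y :: z :: t) 1 d = y := by simp [pysem]
lemma pyGetD_cons2 {α : Type} (x y z : α) (t : List α) (d : α) :
    PySem.List.pyGetD (x :: y :: z :: t) 2 d = z := by simp [pysem]

-- one vedicApply step on a 3x3 grid = the per-cell conditional append A performs
lemma vedicApply_eq (v : Int) (s00 s01 s02 s10 s11 s12 s20 s21 s22 : String) :
    vedicApply [[s00, s01, s02], [s10, s11, s12], [s20, s21, s22]] v =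
      [[if (3 : Int) == v then s00 ++ PySem.Int.toStr v else s00,
        if (1 : Int) == v then s01 ++ PySem.Int.toStr v else s01,
        if (9 : Int) == v then s02 ++ PySem.Int.toStr v else s02],
       [if (6 : Int) == v then s10 ++ PySem.Int.toStr v else s10,
        if (7 : Int) == v then s11 ++ PySem.Int.toStr v else s11,
        if (5 : Int) == v then s12 ++ PySem.Int.toStr v else s12],
       [if (2 : Int) == v then s20 ++ PySem.Int.toStr v else s20,
        if (8 : Int) == v then s21 ++ PySem.Int.toStr v else s21,
        if (4 : Int) == v then s22 ++ PySem.Int.toStr v else s22]] := by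
  rcases vedic_cases v with rfl | rfl | rfl | rfl | rfl | rfl | rfl | rfl | rfl | h
  · simp [vedicApply, vedicPos, PySem.Dict.get?_insert, PySem.Dict.get?_empty, List.modify]
  · simp [vedicApply, vedicPos, PySem.Dict.get?_insert, PySem.Dict.get?_empty, List.modify]
  · simp [vedicApply, vedicPos, PySem.Dict.get?_insert, PySem.Dict.get?_empty, List.modify]
  · simp [vedicApply, vedicPos, PySem.Dict.get?_insert, PySem.Dict.get?_empty, List.modify]
  · simp [vedicApply, vedicPos, PySem.Dict.get?_insert, PySem.Dict.get?_empty, List.modify]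
  · simp [vedicApply, vedicPos, PySem.Dict.get?_insert, PySem.Dict.get?_empty, List.modify]
  · simp [vedicApply, vedicPos, PySem.Dict.get?_insert, PySem.Dict.get?_empty, List.modify]
  · simp [vedicApply, vedicPos, PySem.Dict.get?_insert, PySem.Dict.get?_empty, List.modify]
  · simp [vedicApply, vedicPos, PySem.Dict.get?_insert, PySem.Dict.get?_empty, List.modify]
  · obtain ⟨h3, h1, h9, h6, h7, h5, h2, h8, h4⟩ := h
    simp [vedicApply, vedicPos, PySem.Dict.get?_insert, PySem.Dict.get?_empty, List.modify,
          h3, h1, h9, h6, h7, h5, h2, h8, h4,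
          Ne.symm h3, Ne.symm h1, Ne.symm h9, Ne.symm h6, Ne.symm h7, Ne.symm h5,
          Ne.symm h2, Ne.symm h8, Ne.symm h4]

-- ===== VERDICT (by name: the statement is the Claim_ definition above) =====
set_option maxHeartbeats 1000000 in
theorem update_vedic_grid_spec : Claim_equal_update_vedic_grid := by
  intro bg m a _ hpre
  obtain ⟨hlen, hrows⟩ := hpre
  match bg, hlen with
  | r0 :: r1 :: r2 :: rest, _ =>
    have h0 := hrows r0 (by simp)
    have h1 := hrows r1 (by simp)
    have h2 := hrows r2 (by simp)
    match r0, h0 with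
    | x00 :: x01 :: x02 :: t0, _ =>
      match r1, h1 with
      | x10 :: x11 :: x12 :: t1, _ =>
        match r2, h2 with
        | x20 :: x21 :: x22 :: t2, _ =>
          show update_vedic_grid _ _ _ = update_vedic_grid_alt _ _ _
          have hB : update_vedic_grid_alt
              ((x00 :: x01 :: x02 :: t0) :: (x10 :: x11 :: x12 :: t1) ::
               (x20 :: x21 :: x22 :: t2) :: rest) m a =
              vedicApply (vedicApply [[x00, x01, x02], [x10, x11, x12], [x20, x21, x22]] m) a := by
            unfold update_vedic_grid_alt
            rw [show PySem.List.pyRange 0 3 1 = [0, 1, 2] from rfl]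
            simp only [List.map_cons, List.map_nil,
              pyGetD_cons0, pyGetD_cons1, pyGetD_cons2, List.foldl_cons, List.foldl_nil]
          rw [hB, vedicApply_eq, vedicApply_eq]
          unfold update_vedic_grid vedicMatrix
          simp only [PySem.List.enumerate_cons, PySem.List.enumerate_nil, List.foldl_cons,
            List.foldl_nil, pyGetD_cons0, pyGetD_cons1, pyGetD_cons2,
            List.nil_append, List.cons_append]
          norm_num [pyGetD_cons0, pyGetD_cons1, pyGetD_cons2]
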